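-- pv_equiv track=rewrite | github.com/tlsfuzzer/tlsfuzzer | tlsfuzzer/analysis.py | _read_tuples
-- ===== SOURCE A (Python) =====
-- def _read_tuples(data):
--     current_block_id = None
--     block_values = dict()
--     for value, group, block in zip(data['value'],
--                                    data['group'],
--                                    data['block']):
--         if block != current_block_id:
--             if block_values:
--                 yield block_values
--                 block_values = dict()
--             current_block_id = block
--         block_values[group] = value
--     if block_values:
--         yield block_values
-- ===== SOURCE B (Python) =====
-- def _read_tuples(data):
--     rows = list(zip(data['value'], data['group'], data['block']))
--     n = len(rows)
--     i = 0
--     while i < n: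
--         blk = rows[i][2]
--         j = i
--         while j < n and rows[j][2] == blk:
--             j += 1
--         yield {g: v for v, g, _ in rows[i:j]}
--         i = j
-- ===== Notes on version B (the rewrite author's own statement) =====
-- stated objective: alternative
-- what changed: Replaces A's per-row state machine (current_block_id tracking with flush-and-reset of a mutable dict) by materializing the rows once and splitting them into maximal consecutive runs of equal block id with a two-pointer scan, emitting each run as a dict comprehension.
import Mathlib
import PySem

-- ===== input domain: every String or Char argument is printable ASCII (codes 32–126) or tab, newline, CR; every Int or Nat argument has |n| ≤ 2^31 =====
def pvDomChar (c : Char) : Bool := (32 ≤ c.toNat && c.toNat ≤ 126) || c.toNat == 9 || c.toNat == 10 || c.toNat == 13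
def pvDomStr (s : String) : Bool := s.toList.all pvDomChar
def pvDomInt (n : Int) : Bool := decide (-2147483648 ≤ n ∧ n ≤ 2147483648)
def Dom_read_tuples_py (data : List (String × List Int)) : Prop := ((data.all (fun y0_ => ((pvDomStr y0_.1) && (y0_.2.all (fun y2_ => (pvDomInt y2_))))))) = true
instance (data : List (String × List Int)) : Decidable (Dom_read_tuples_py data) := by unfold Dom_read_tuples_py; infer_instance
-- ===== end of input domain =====

-- B replaces A's flush-and-reset state machine by splitting the rows into maximal consecutive runs of equal block id (alternative decomposition; same return value).

-- ===== PORT A =====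
-- A's for-loop: state = (current_block_id, block_values, dicts yielded so far); each yield emits the dict's items
def pvALoop : List (Int × Int × Int) → Option Int → PySem.Dict Int Int → List (List (Int × Int)) →
    PySem.Dict Int Int × List (List (Int × Int))
  | [], _, bv, acc => (bv, acc)
  | (v, g, b) :: rest, cur, bv, acc =>
    if some b ≠ cur then
      if bv.items.isEmpty then
        pvALoop rest (some b) (bv.insert g v) acc
      else
        pvALoop rest (some b) (PySem.Dict.empty.insert g v) (acc ++ [bv.items])
    else
      pvALoop rest cur (bv.insert g v) acc

-- A's trailing 'if block_values: yield block_values'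
def pvFinish (p : PySem.Dict Int Int × List (List (Int × Int))) : List (List (Int × Int)) :=
  if p.1.items.isEmpty then p.2 else p.2 ++ [p.1.items]

def read_tuples_py (data : List (String × List Int)) : List (List (Int × Int)) :=
  let d := PySem.Dict.mk data
  match d.get? "value", d.get? "group", d.get? "block" with
  | some vs, some gs, some bs =>
    pvFinish (pvALoop (vs.zip (gs.zip bs)) none PySem.Dict.empty [])
  | _, _, _ => []   -- KeyError in Python; excluded by Pre_

-- ===== PORT B =====
-- B's inner while: scan the maximal run of rows sharing the head's block id, then recurse on the rest
def pvSplitRuns : List (Int × Int × Int) → List (List (Int × Int × Int))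
  | [] => []
  | r :: rest =>
    ((r :: rest).takeWhile (fun q => q.2.2 == r.2.2)) ::
      pvSplitRuns ((r :: rest).dropWhile (fun q => q.2.2 == r.2.2))
  termination_by l => l.length
  decreasing_by
    simp [List.dropWhile]
    exact List.length_dropWhile_le _ _

-- {g: v for v, g, _ in rows[i:j]}
def pvRunDict (run : List (Int × Int × Int)) : List (Int × Int) :=
  (run.foldl (fun d r => d.insert r.2.1 r.1) PySem.Dict.empty).items

def read_tuples_py_alt (data : List (String × List Int)) : List (List (Int × Int)) :=
  let d := PySem.Dict.mk data
  match d.get? "value" with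
  | none => []   -- KeyError in Python; excluded by Pre_
  | some vs =>
    match d.get? "group" with
    | none => []
    | some gs =>
      match d.get? "block" with
      | none => []
      | some bs => (pvSplitRuns (vs.zip (gs.zip bs))).map pvRunDict

-- ===== PRECONDITION & SPEC =====
-- Pre_ excludes exactly the inputs missing one of the keys 'value', 'group', 'block', on which Python A raises KeyError.
def Pre_read_tuples_py (data : List (String × List Int)) : Prop :=
  "value" ∈ data.map Prod.fst ∧ "group" ∈ data.map Prod.fst ∧ "block" ∈ data.map Prod.fst
instance (data : List (String × List Int)) : Decidable (Pre_read_tuples_py data) := by unfold Pre_read_tuples_py; infer_instance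

def pvWitness_read_tuples_py : (List (String × List Int)) :=
  [("value", [1, 2, 3]), ("group", [0, 1, 0]), ("block", [5, 5, 7])]

def Spec_read_tuples_py (data : List (String × List Int)) (out : List (List (Int × Int))) : Prop := out = read_tuples_py_alt data
instance (data : List (String × List Int)) (out : List (List (Int × Int))) : Decidable (Spec_read_tuples_py data out) := by unfold Spec_read_tuples_py; infer_instance

-- ===== CLAIM (what is proved, stated in full; the proofs are below) =====
def Claim_equal_read_tuples_py : Prop := ∀ (data : List (String × List Int)), Dom_read_tuples_py data → Pre_read_tuples_py data → Spec_read_tuples_py data (read_tuples_py data)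

-- ===== LEMMAS AND PROOFS =====

theorem pv_insert_items_ne_nil {d : PySem.Dict Int Int} {k v : Int} : (d.insert k v).items ≠ [] := by
  intro h
  have := PySem.Dict.mem_items_insert_self (d := d) (k := k) (v := v)
  rw [h] at this
  simp at this

-- loop invariant: with bv nonempty and cur = some b, the rest of A's loop yields the current
-- run merged into bv followed by B's runs of the remaining rows
theorem pv_loop_eq (rest : List (Int × Int × Int)) :
    ∀ (b : Int) (bv : PySem.Dict Int Int) (acc : List (List (Int × Int))), bv.items ≠ [] →
    pvFinish (pvALoop rest (some b) bv acc) =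
    acc ++ [((rest.takeWhile (fun q => q.2.2 == b)).foldl (fun d r => d.insert r.2.1 r.1) bv).items]
      ++ (pvSplitRuns (rest.dropWhile (fun q => q.2.2 == b))).map pvRunDict := by
  induction rest with
  | nil =>
    intro b bv acc h
    simp [pvALoop, pvSplitRuns, pvFinish, List.isEmpty_iff, h]
  | cons r t ih =>
    obtain ⟨v, g, b'⟩ := r
    intro b bv acc h
    by_cases hb : b' = b
    · subst hb
      rw [show pvALoop ((v, g, b') :: t) (some b') bv acc = pvALoop t (some b') (bv.insert g v) acc by
            simp [pvALoop]]
      rw [ih b' (bv.insert g v) acc pv_insert_items_ne_nil]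
      simp
    · rw [show pvALoop ((v, g, b') :: t) (some b) bv acc
            = pvALoop t (some b') (PySem.Dict.empty.insert g v) (acc ++ [bv.items]) by
            simp [pvALoop, hb, List.isEmpty_iff, h]]
      rw [ih b' (PySem.Dict.empty.insert g v) (acc ++ [bv.items]) pv_insert_items_ne_nil]
      simp [pvSplitRuns, hb, pvRunDict]

theorem pv_main (rows : List (Int × Int × Int)) :
    pvFinish (pvALoop rows none PySem.Dict.empty []) = (pvSplitRuns rows).map pvRunDict := by
  cases rows with
  | nil => simp [pvALoop, pvSplitRuns, pvFinish, PySem.Dict.empty]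
  | cons r t =>
    obtain ⟨v, g, b⟩ := r
    rw [show pvALoop ((v, g, b) :: t) none PySem.Dict.empty []
          = pvALoop t (some b) (PySem.Dict.empty.insert g v) [] by simp [pvALoop, PySem.Dict.empty]]
    rw [pv_loop_eq t b (PySem.Dict.empty.insert g v) [] pv_insert_items_ne_nil]
    simp [pvSplitRuns, pvRunDict]

-- ===== VERDICT (by name: the statement is the Claim_ definition above) =====
theorem read_tuples_py_spec : Claim_equal_read_tuples_py := by
  intro data _ hpre
  unfold Spec_read_tuples_py read_tuples_py read_tuples_py_alt
  obtain ⟨h1, h2, h3⟩ := hpre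
  cases hv : (PySem.Dict.mk data).get? "value" with
  | none =>
    exfalso
    rw [PySem.Dict.get?_eq_none_iff_not_mem_keys] at hv
    exact hv (by simpa [PySem.Dict.keys] using h1)
  | some vs =>
    cases hg : (PySem.Dict.mk data).get? "group" with
    | none =>
      exfalso
      rw [PySem.Dict.get?_eq_none_iff_not_mem_keys] at hg
      exact hg (by simpa [PySem.Dict.keys] using h2)
    | some gs =>
      cases hbk : (PySem.Dict.mk data).get? "block" with
      | none =>
        exfalso
        rw [PySem.Dict.get?_eq_none_iff_not_mem_keys] at hbk
        exact hbk (by simpa [PySem.Dict.keys] using h3)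
      | some bs =>
        simp only [hv, hg, hbk]
        exact pv_main (vs.zip (gs.zip bs))
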